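-- pv_equiv track=rewrite | github.com/beyond-all-reason/Beyond-All-Reason | tools/DrKillinger/vertex_cache.py | get_cache_optimized_vertex_map
-- ===== SOURCE A (Python) =====
-- def get_cache_optimized_vertex_map(triangles):
--     """Map vertices so triangles have consequetive indices.
--
--     >>> get_cache_optimized_vertex_map([(5,2,1),(0,2,3)])
--     [3, 2, 1, 4, None, 0]
--     """
--     num_vertices = max(max(triangle) for triangle in triangles) + 1
--     vertex_map = [None for i in range(num_vertices)]
--     new_vertex = 0
--     for triangle in triangles:
--         for old_vertex in triangle:
--             if vertex_map[old_vertex] is None: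
--                 vertex_map[old_vertex] = new_vertex
--                 new_vertex += 1
--     return vertex_map
-- ===== SOURCE B (Python) =====
-- def get_cache_optimized_vertex_map(triangles):
--     """Map vertices so triangles have consequetive indices."""
--     num_vertices = max(max(triangle) for triangle in triangles) + 1
--     vertex_map = [None] * num_vertices
--     flat = [v for triangle in triangles for v in triangle]
--     for pos in range(len(flat) - 1, -1, -1):
--         vertex_map[flat[pos]] = pos          # last write wins: each cell keeps its earliest position
--     positions = sorted(p for p in vertex_map if p is not None)
--     return [None if p is None else positions.index(p) for p in vertex_map]
-- ===== Notes on version B (the rewrite author's own statement) =====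
-- stated objective: alternative
-- what changed: Replaces A's interleaved nested loop (is-None guard plus manual counter) by a different algorithm: one reverse last-write-wins pass storing each cell's earliest flat position, then rank compression of those positions via sorting; Pre_ excludes only inputs where A raises (empty list, or a vertex below -(max+1)).
import Mathlib
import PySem

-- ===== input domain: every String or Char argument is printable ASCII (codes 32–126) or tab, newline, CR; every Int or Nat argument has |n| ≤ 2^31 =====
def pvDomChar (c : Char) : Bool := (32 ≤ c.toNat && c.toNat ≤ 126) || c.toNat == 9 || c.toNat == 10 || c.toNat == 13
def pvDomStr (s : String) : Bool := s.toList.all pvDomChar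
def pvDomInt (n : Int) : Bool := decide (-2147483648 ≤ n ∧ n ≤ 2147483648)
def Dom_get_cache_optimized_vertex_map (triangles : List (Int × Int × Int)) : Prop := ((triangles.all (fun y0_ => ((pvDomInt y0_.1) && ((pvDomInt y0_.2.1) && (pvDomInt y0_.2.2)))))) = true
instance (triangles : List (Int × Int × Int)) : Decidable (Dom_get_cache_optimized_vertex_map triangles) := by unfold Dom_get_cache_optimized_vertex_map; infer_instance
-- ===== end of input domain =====

-- B replaces A's interleaved nested loop (is-None guard + manual counter) by a different
-- algorithm: a reverse last-write-wins pass storing each cell's earliest flat position,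
-- then rank compression of those positions by sorting.

-- ===== PORT A =====
-- max(triangle) on a 3-tuple
def pvTriMax (t : Int × Int × Int) : Int := max t.1 (max t.2.1 t.2.2)

-- one iteration of A's inner loop body: the is-None check, the write, the counter bump.
-- pyGet? = none (IndexError) is excluded by Pre_; the state is returned unchanged there.
def pvAStep (s : List (Option Int) × Int) (v : Int) : List (Option Int) × Int :=
  match PySem.List.pyGet? s.1 v with
  | some none => (PySem.List.pySetD s.1 v (some s.2), s.2 + 1)
  | _ => s

def get_cache_optimized_vertex_map (triangles : List (Int × Int × Int)) : List (Option Int) :=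
  match PySem.List.max? (triangles.map pvTriMax) (fun x => x) with
  | none => []  -- Python raises ValueError on the empty list (excluded by Pre_)
  | some m =>
    let num_vertices : Int := m + 1
    let vertex_map : List (Option Int) := (List.range num_vertices.toNat).map (fun _ => none)
    (triangles.foldl (fun s t => pvAStep (pvAStep (pvAStep s t.1) t.2.1) t.2.2) (vertex_map, 0)).1

-- ===== PORT B =====
def get_cache_optimized_vertex_map_alt (triangles : List (Int × Int × Int)) : List (Option Int) :=
  match PySem.List.max? (triangles.map pvTriMax) (fun x => x) with
  | none => []  -- Python raises ValueError on the empty list (excluded by Pre_)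
  | some m =>
    let num_vertices : Int := m + 1
    let vertex_map : List (Option Int) := PySem.List.pyRepeat [none] num_vertices  -- [None]*num_vertices
    let flat : List Int := triangles.flatMap (fun t => [t.1, t.2.1, t.2.2])
    -- for pos in range(len(flat)-1, -1, -1): vertex_map[flat[pos]] = pos
    -- pySetD leaves the list unchanged where Python raises IndexError (excluded by Pre_)
    let vm : List (Option Int) :=
      (PySem.List.pyRange ((flat.length : Int) - 1) (-1) (-1)).foldl
        (fun mp pos => PySem.List.pySetD mp (PySem.List.pyGetD flat pos 0) (some pos)) vertex_map
    -- positions = sorted(p for p in vertex_map if p is not None)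
    let positions : List Int := PySem.List.sorted (vm.filterMap (fun p => p)) (fun x => x)
    -- [None if p is None else positions.index(p) for p in vertex_map]
    -- (positions.index(p): ValueError is impossible here, modelled by the none of index?)
    vm.map (fun p => p.bind (fun q => (PySem.List.index? positions q).map (fun t => (t : Int))))

-- ===== PRECONDITION & SPEC =====
-- all vertices of all triangles, in traversal order
def pvVerts (triangles : List (Int × Int × Int)) : List Int :=
  triangles.flatMap (fun t => [t.1, t.2.1, t.2.2])

-- Pre_ excludes exactly the inputs where A raises: the empty list (ValueError from max()) and
-- inputs with a vertex below -(max_vertex+1) (IndexError from vertex_map[old_vertex]).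
def Pre_get_cache_optimized_vertex_map (triangles : List (Int × Int × Int)) : Prop :=
  triangles ≠ [] ∧ ∀ v ∈ pvVerts triangles, ∃ u ∈ pvVerts triangles, -(u + 1) ≤ v

instance (triangles : List (Int × Int × Int)) : Decidable (Pre_get_cache_optimized_vertex_map triangles) := by
  unfold Pre_get_cache_optimized_vertex_map; infer_instance

def pvWitness_get_cache_optimized_vertex_map : (List (Int × Int × Int)) := [(5, 2, 1), (0, 2, 3)]

def Spec_get_cache_optimized_vertex_map (triangles : List (Int × Int × Int)) (out : List (Option Int)) : Prop := out = get_cache_optimized_vertex_map_alt triangles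

instance (triangles : List (Int × Int × Int)) (out : List (Option Int)) : Decidable (Spec_get_cache_optimized_vertex_map triangles out) := by
  unfold Spec_get_cache_optimized_vertex_map; infer_instance

-- ===== CLAIM (what is proved, stated in full; the proofs are below) =====
def Claim_equal_get_cache_optimized_vertex_map : Prop := ∀ (triangles : List (Int × Int × Int)), Dom_get_cache_optimized_vertex_map triangles → Pre_get_cache_optimized_vertex_map triangles → Spec_get_cache_optimized_vertex_map triangles (get_cache_optimized_vertex_map triangles)

-- ===== LEMMAS AND PROOFS =====

-- the cell Python's xs[v] denotes for -n ≤ v < n (n = length), as an Int in [0, n)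
def pvSlotI (n v : Int) : Int := if v < 0 then v + n else v

lemma pv_slot_bounds {n v : Int} (h1 : -n ≤ v) (h2 : v < n) :
    0 ≤ pvSlotI n v ∧ pvSlotI n v < n := by
  unfold pvSlotI; split_ifs <;> omega

lemma pv_pyIdx_resolve {len : Nat} {v : Int} (h1 : -(len : Int) ≤ v) (h2 : v < (len : Int)) :
    PySem.List.pyIdx? len v = some (pvSlotI (len : Int) v).toNat := by
  unfold PySem.List.pyIdx? pvSlotI
  by_cases hv : v < 0
  · rw [if_neg (by omega), if_pos (by omega), if_pos hv]
    congr 1; omega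
  · rw [if_pos (by omega), if_pos (by omega), if_neg hv]

lemma pv_pyGet_resolve {α : Type} {xs : List α} {v : Int}
    (h1 : -(xs.length : Int) ≤ v) (h2 : v < (xs.length : Int)) :
    PySem.List.pyGet? xs v = xs[(pvSlotI (xs.length : Int) v).toNat]? := by
  unfold PySem.List.pyGet?
  rw [pv_pyIdx_resolve h1 h2]
  rfl

lemma pv_pySetD_resolve {α : Type} {xs : List α} {v : Int} (a : α)
    (h1 : -(xs.length : Int) ≤ v) (h2 : v < (xs.length : Int)) :
    PySem.List.pySetD xs v a = xs.set (pvSlotI (xs.length : Int) v).toNat a := by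
  unfold PySem.List.pySetD PySem.List.pySet?
  rw [pv_pyIdx_resolve h1 h2]
  rfl

-- first-appearance rank of slot i in the slot list u, as A's map stores it
def pvIdx (u : List Int) (i : Int) : Option Int :=
  (PySem.List.index? u i).map (fun k => Int.ofNat k)

-- the three-vertex fold over triangles is the one-vertex fold over the flattened vertex list
lemma pv_fold_flat {σ : Type} (f : σ → Int → σ) (triangles : List (Int × Int × Int)) (init : σ) :
    triangles.foldl (fun s t => f (f (f s t.1) t.2.1) t.2.2) init
      = (pvVerts triangles).foldl f init := by
  induction triangles generalizing init with
  | nil => rfl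
  | cons t ts ih =>
    simp only [List.foldl_cons, pvVerts, List.flatMap_cons, List.foldl_append, List.foldl_nil]
    simp only [pvVerts] at ih
    exact ih _

-- appending a fresh element does not disturb earlier ranks
lemma pv_idx_append_ne {u : List Int} {v i : Int} (hne : i ≠ v) :
    pvIdx (u ++ [v]) i = pvIdx u i := by
  by_cases hmem : i ∈ u
  · unfold pvIdx
    rw [PySem.List.index?_append_of_mem _ hmem]
  · unfold pvIdx
    have h1 : PySem.List.index? u i = none := (PySem.List.index?_eq_none_iff _ _).mpr hmem
    have h2 : PySem.List.index? (u ++ [v]) i = none := by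
      apply (PySem.List.index?_eq_none_iff _ _).mpr
      simp [hmem, hne]
    rw [h1, h2]

-- the invariant tying A's (vertex_map, counter) state to the first-appearance slot list u
def pvInvA (s : List (Option Int) × Int) (u : List Int) (n : Nat) : Prop :=
  s.1.length = n ∧ s.2 = (u.length : Int) ∧
    ∀ i : Nat, i < n → s.1[i]? = some (pvIdx u (i : Int))

lemma pv_stepA {s : List (Option Int) × Int} {u : List Int} {n : Nat} {v : Int}
    (hinv : pvInvA s u n) (h0 : -(n : Int) ≤ v) (hv : v < (n : Int)) :
    pvInvA (pvAStep s v) (PySem.Set.add u (pvSlotI (n : Int) v)) n := by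
  obtain ⟨hlen, hc, hpt⟩ := hinv
  obtain ⟨hw0, hwlt⟩ := pv_slot_bounds h0 hv
  set w : Int := pvSlotI (n : Int) v with hwdef
  have hwn : w.toNat < n := by omega
  have hww : ((w.toNat : Nat) : Int) = w := by omega
  have hget : PySem.List.pyGet? s.1 v = s.1[w.toNat]? := by
    rw [pv_pyGet_resolve (by omega) (by omega), hlen]
  have hptv := hpt w.toNat hwn
  rw [hww] at hptv
  have hset : PySem.List.pySetD s.1 v (some s.2) = s.1.set w.toNat (some s.2) := by
    rw [pv_pySetD_resolve _ (by omega) (by omega), hlen]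
  by_cases hmem : w ∈ u
  · -- already ranked: A skips, the set is unchanged
    obtain ⟨k, hk⟩ := Option.isSome_iff_exists.mp ((PySem.List.index?_isSome_iff _ _).mpr hmem)
    have : PySem.List.pyGet? s.1 v = some (some (k : Int)) := by
      rw [hget, hptv]; unfold pvIdx; rw [hk]; rfl
    unfold pvAStep
    rw [this, PySem.Set.add_of_mem hmem]
    exact ⟨hlen, hc, hpt⟩
  · -- fresh slot: A writes the counter, the set appends
    have hidxnone : PySem.List.index? u w = none := (PySem.List.index?_eq_none_iff _ _).mpr hmem
    have : PySem.List.pyGet? s.1 v = some none := by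
      rw [hget, hptv]; unfold pvIdx; rw [hidxnone]; rfl
    unfold pvAStep
    rw [this, PySem.Set.add_of_not_mem hmem]
    refine ⟨by simp [hset, hlen], by simp [hc], ?_⟩
    intro i hi
    rw [hset]
    by_cases hiw : i = w.toNat
    · subst hiw
      rw [List.getElem?_set_self (by omega)]
      unfold pvIdx
      rw [hww, PySem.List.index?_append_singleton_self u w hmem]
      simp [hc]
    · rw [List.getElem?_set_ne (fun h => hiw h.symm), hpt i hi,
        pv_idx_append_ne (by omega)]

lemma pv_foldA {vs : List Int} {s : List (Option Int) × Int} {u : List Int} {n : Nat}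
    (hinv : pvInvA s u n) (hvs : ∀ v ∈ vs, -(n : Int) ≤ v ∧ v < (n : Int)) :
    pvInvA (vs.foldl pvAStep s) (vs.foldl (fun u v => PySem.Set.add u (pvSlotI (n : Int) v)) u) n := by
  induction vs generalizing s u with
  | nil => exact hinv
  | cons v vs ih =>
    have hv := hvs v (by simp)
    exact ih (pv_stepA hinv hv.1 hv.2) (fun w hw => hvs w (by simp [hw]))

-- B's reverse position pass, characterised pointwise: each cell keeps the FIRST position
-- (in forward order) of its slot within the first k flat vertices
lemma pv_revfill (vs : List Int) (n : Nat) (hb : ∀ v ∈ vs, -(n : Int) ≤ v ∧ v < (n : Int)) :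
    ∀ (k : Nat) (mp : List (Option Int)), k ≤ vs.length → mp.length = n →
    ((PySem.List.pyRange ((k : Int) - 1) (-1) (-1)).foldl
        (fun mp pos => PySem.List.pySetD mp (PySem.List.pyGetD vs pos 0) (some pos)) mp).length = n ∧
    ∀ i : Nat, i < n →
      ((PySem.List.pyRange ((k : Int) - 1) (-1) (-1)).foldl
          (fun mp pos => PySem.List.pySetD mp (PySem.List.pyGetD vs pos 0) (some pos)) mp)[i]? =
        some ((PySem.List.index? ((vs.take k).map (pvSlotI (n : Int))) (i : Int)).elim
          (mp[i]?.getD none) (fun t => some (Int.ofNat t))) := by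
  intro k
  induction k with
  | zero =>
    intro mp _ hlen
    rw [PySem.List.pyRange_neg_one_eq_nil (by omega)]
    refine ⟨by simpa using hlen, ?_⟩
    intro i hi
    simp only [List.foldl_nil, List.take_zero, List.map_nil]
    rw [(PySem.List.index?_eq_none_iff _ _).mpr (by simp)]
    rw [List.getElem?_eq_getElem (by omega)]
    rfl
  | succ k ih =>
    intro mp hk hlen
    have hkl : k < vs.length := by omega
    have hrange : PySem.List.pyRange (((k + 1 : Nat) : Int) - 1) (-1) (-1)
        = (k : Int) :: PySem.List.pyRange ((k : Int) - 1) (-1) (-1) := by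
      have : (((k + 1 : Nat) : Int) - 1) = (k : Int) := by push_cast; ring
      rw [this, PySem.List.pyRange_neg_one_cons (by omega)]
    rw [hrange]
    simp only [List.foldl_cons]
    have hread : PySem.List.pyGetD vs ((k : Nat) : Int) 0 = vs[k] := by
      rw [PySem.List.pyGetD_natCast, List.getD_eq_getElem?_getD, List.getElem?_eq_getElem hkl]
      rfl
    obtain ⟨hv1, hv2⟩ := hb vs[k] (by exact List.getElem_mem hkl)
    obtain ⟨hw0, hwlt⟩ := pv_slot_bounds hv1 hv2
    set w : Int := pvSlotI (n : Int) vs[k] with hwdef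
    have hww : ((w.toNat : Nat) : Int) = w := by omega
    have hset : PySem.List.pySetD mp (PySem.List.pyGetD vs ((k : Nat) : Int) 0) (some (k : Int))
        = mp.set w.toNat (some (k : Int)) := by
      rw [hread, pv_pySetD_resolve _ (by omega) (by omega), hlen]
    rw [hset]
    have hlen' : (mp.set w.toNat (some (k : Int))).length = n := by simpa using hlen
    obtain ⟨ihlen, ihpt⟩ := ih (mp.set w.toNat (some (k : Int))) (by omega) hlen'
    refine ⟨ihlen, ?_⟩
    intro i hi
    rw [ihpt i hi]
    have htake0 : vs.take (k + 1) = vs.take k ++ [vs[k]] := by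
      rw [List.take_add_one, List.getElem?_eq_getElem hkl]
      rfl
    have htake : (vs.take (k + 1)).map (pvSlotI (n : Int))
        = (vs.take k).map (pvSlotI (n : Int)) ++ [w] := by
      rw [htake0, List.map_append, hwdef]
      simp only [List.map_cons, List.map_nil]
    rw [htake]
    by_cases hmem : (i : Int) ∈ (vs.take k).map (pvSlotI (n : Int))
    · -- the slot appears among the earlier positions: both sides use that earlier rank
      rw [PySem.List.index?_append_of_mem _ hmem]
      obtain ⟨t, ht⟩ := Option.isSome_iff_exists.mp ((PySem.List.index?_isSome_iff _ _).mpr hmem)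
      rw [ht]
      rfl
    · have h1 : PySem.List.index? ((vs.take k).map (pvSlotI (n : Int))) (i : Int) = none :=
        (PySem.List.index?_eq_none_iff _ _).mpr hmem
      rw [h1]
      by_cases hiw : (i : Int) = w
      · have hiw' : i = w.toNat := by omega
        have h2 : PySem.List.index? ((vs.take k).map (pvSlotI (n : Int)) ++ [w]) (i : Int)
            = some ((vs.take k).map (pvSlotI (n : Int))).length := by
          rw [hiw]
          exact PySem.List.index?_append_singleton_self _ w (by rw [← hiw]; exact hmem)
        rw [h2]
        have hklen : ((vs.take k).map (pvSlotI (n : Int))).length = k := by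
          simp [List.length_take, Nat.min_eq_left (by omega : k ≤ vs.length)]
        rw [hklen, hiw', List.getElem?_set_self (by omega)]
        rfl
      · have h2 : PySem.List.index? ((vs.take k).map (pvSlotI (n : Int)) ++ [w]) (i : Int) = none := by
          apply (PySem.List.index?_eq_none_iff _ _).mpr
          intro hcon
          rcases List.mem_append.mp hcon with h | h
          · exact hmem h
          · exact hiw (List.mem_singleton.mp h)
        rw [h2]
        have hne' : w.toNat ≠ i := fun h => hiw (by omega)
        rw [List.getElem?_set_ne hne']

-- first position of slot i, total on members
def pvFp (ws : List Int) (i : Int) : Nat := (PySem.List.index? ws i).getD 0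

lemma pv_fp_lt_length {ws : List Int} {i : Int} (h : i ∈ ws) : pvFp ws i < ws.length := by
  obtain ⟨t, ht⟩ := Option.isSome_iff_exists.mp ((PySem.List.index?_isSome_iff _ _).mpr h)
  obtain ⟨hk, -, -⟩ := PySem.List.getElem_of_index?_eq_some ht
  unfold pvFp
  rw [ht]
  exact hk

lemma pv_fp_append_of_mem {ws t : List Int} {i : Int} (h : i ∈ ws) :
    pvFp (ws ++ t) i = pvFp ws i := by
  unfold pvFp
  rw [PySem.List.index?_append_of_mem t h]

lemma pv_fp_inj {ws : List Int} {i j : Int} (hi : i ∈ ws) (hj : j ∈ ws)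
    (h : pvFp ws i = pvFp ws j) : i = j := by
  obtain ⟨t1, ht1⟩ := Option.isSome_iff_exists.mp ((PySem.List.index?_isSome_iff _ _).mpr hi)
  obtain ⟨t2, ht2⟩ := Option.isSome_iff_exists.mp ((PySem.List.index?_isSome_iff _ _).mpr hj)
  obtain ⟨hk1, he1, -⟩ := PySem.List.getElem_of_index?_eq_some ht1
  obtain ⟨hk2, he2, -⟩ := PySem.List.getElem_of_index?_eq_some ht2
  unfold pvFp at h
  rw [ht1, ht2] at h
  simp only [Option.getD_some] at h
  subst h
  rw [← he1, ← he2]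

-- the set of first appearances, in insertion order, has strictly increasing first positions
lemma pv_ofList_fp_pairwise (ws : List Int) :
    (PySem.Set.ofList ws).Pairwise (fun a b => pvFp ws a < pvFp ws b) := by
  induction ws using List.reverseRecOn with
  | nil => simp [PySem.Set.ofList_nil]
  | append_singleton xs x ih =>
    rw [PySem.Set.ofList_append_singleton]
    by_cases hmem : x ∈ xs
    · rw [PySem.Set.add_of_mem (by rwa [PySem.Set.mem_ofList])]
      refine List.Pairwise.imp_of_mem ?_ ih
      intro a b ha hb hab
      have ha' := (PySem.Set.mem_ofList _ _).mp ha
      have hb' := (PySem.Set.mem_ofList _ _).mp hb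
      rwa [pv_fp_append_of_mem ha', pv_fp_append_of_mem hb']
    · rw [PySem.Set.add_of_not_mem (fun h => hmem ((PySem.Set.mem_ofList _ _).mp h))]
      rw [List.pairwise_append]
      refine ⟨?_, by simp, ?_⟩
      · refine List.Pairwise.imp_of_mem ?_ ih
        intro a b ha hb hab
        have ha' := (PySem.Set.mem_ofList _ _).mp ha
        have hb' := (PySem.Set.mem_ofList _ _).mp hb
        rwa [pv_fp_append_of_mem ha', pv_fp_append_of_mem hb']
      · intro a ha b hb
        have ha' := (PySem.Set.mem_ofList _ _).mp ha
        rw [List.mem_singleton] at hb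
        subst hb
        rw [pv_fp_append_of_mem ha']
        have h1 : pvFp xs a < xs.length := pv_fp_lt_length ha'
        have h2 : pvFp (xs ++ [b]) b = xs.length := by
          unfold pvFp
          rw [PySem.List.index?_append_singleton_self xs b hmem]
          rfl
        omega

-- index? through an injective-on-members map
lemma pv_index_map {u : List Int} {g : Int → Int} {x : Int} (hx : x ∈ u)
    (hinj : ∀ a ∈ u, ∀ b ∈ u, g a = g b → a = b) :
    PySem.List.index? (u.map g) (g x) = PySem.List.index? u x := by
  induction u with
  | nil => simp at hx
  | cons a u ih =>
    by_cases hax : a = x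
    · subst hax
      rw [List.map_cons, PySem.List.index?_cons_self, PySem.List.index?_cons_self]
    · have hga : g a ≠ g x := by
        intro h
        rcases List.mem_cons.mp hx with h' | h'
        · exact hax h'.symm
        · exact hax (hinj a (by simp) x (by simp [h']) h)
      rw [List.map_cons, PySem.List.index?_cons_of_ne _ hga, PySem.List.index?_cons_of_ne _ hax]
      have hx' : x ∈ u := by
        rcases List.mem_cons.mp hx with h' | h'
        · exact absurd h'.symm hax
        · exact h'
      rw [ih hx' (fun a ha b hb => hinj a (by simp [ha]) b (by simp [hb]))]

lemma pv_triMax_bounds (t : Int × Int × Int) :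
    t.1 ≤ pvTriMax t ∧ t.2.1 ≤ pvTriMax t ∧ t.2.2 ≤ pvTriMax t := by
  unfold pvTriMax
  refine ⟨le_max_left _ _, ?_, ?_⟩
  · exact le_trans (le_max_left _ _) (le_max_right _ _)
  · exact le_trans (le_max_right _ _) (le_max_right _ _)

-- every vertex is bounded by the computed maximum
lemma pv_verts_le_max {triangles : List (Int × Int × Int)} {m : Int}
    (hm : PySem.List.max? (triangles.map pvTriMax) (fun x => x) = some m) :
    ∀ v ∈ pvVerts triangles, v ≤ m := by
  intro v hv
  simp only [pvVerts, List.mem_flatMap] at hv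
  obtain ⟨t, ht, hvt⟩ := hv
  have hle := PySem.List.max?_isMax hm (pvTriMax t) (List.mem_map_of_mem ht)
  have hb := pv_triMax_bounds t
  simp at hvt
  rcases hvt with rfl | rfl | rfl
  · exact le_trans hb.1 hle
  · exact le_trans hb.2.1 hle
  · exact le_trans hb.2.2 hle

-- ===== VERDICT (by name: the statement is the Claim_ definition above) =====
theorem get_cache_optimized_vertex_map_spec : Claim_equal_get_cache_optimized_vertex_map := by
  intro triangles _ hpre
  obtain ⟨hne, hlb⟩ := hpre
  obtain ⟨m, hm⟩ : ∃ m, PySem.List.max? (triangles.map pvTriMax) (fun x => x) = some m := by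
    cases hmm : PySem.List.max? (triangles.map pvTriMax) (fun x => x) with
    | none => exact absurd (by simpa using (PySem.List.max?_eq_none_iff _ _).mp hmm) hne
    | some m => exact ⟨m, rfl⟩
  have hub := pv_verts_le_max hm
  have hm0 : 0 ≤ m := by
    obtain ⟨t, ht⟩ := List.exists_mem_of_ne_nil triangles hne
    have htv : t.1 ∈ pvVerts triangles := by
      simp only [pvVerts, List.mem_flatMap]
      exact ⟨t, ht, by simp⟩
    obtain ⟨u, hu, hle⟩ := hlb t.1 htv
    have := hub u hu
    have := hub t.1 htv
    omega
  unfold Spec_get_cache_optimized_vertex_map get_cache_optimized_vertex_map get_cache_optimized_vertex_map_alt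
  rw [hm]
  simp only []
  rw [pv_fold_flat pvAStep]
  rw [show pvVerts triangles = triangles.flatMap (fun t => [t.1, t.2.1, t.2.2]) from rfl]
  set n : Nat := (m + 1).toNat with hn
  have hnm : ((n : Nat) : Int) = m + 1 := by omega
  set vs : List Int := triangles.flatMap (fun t => [t.1, t.2.1, t.2.2]) with hvs
  have hvs' : pvVerts triangles = vs := rfl
  have hbnd : ∀ v ∈ vs, -(n : Int) ≤ v ∧ v < (n : Int) := by
    intro v hv
    rw [← hvs'] at hv
    obtain ⟨u, hu, hle⟩ := hlb v hv
    have h1 := hub u hu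
    have h2 := hub v hv
    omega
  set ws : List Int := vs.map (pvSlotI (n : Int)) with hws
  have hwsb : ∀ w ∈ ws, 0 ≤ w ∧ w < (n : Int) := by
    intro w hw
    rw [hws, List.mem_map] at hw
    obtain ⟨v, hv, rfl⟩ := hw
    exact pv_slot_bounds (hbnd v hv).1 (hbnd v hv).2
  -- A's side: the interleaved loop, via the invariant
  have hinv0 : pvInvA ((List.range n).map (fun _ => (none : Option Int)), 0) [] n := by
    refine ⟨by simp, by simp, ?_⟩
    intro i hi
    simp [hi, pvIdx, PySem.List.index?_eq_idxOf?, List.idxOf?_nil]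
  have hinvA := pv_foldA (vs := vs) hinv0 hbnd
  have hfoldws : vs.foldl (fun u v => PySem.Set.add u (pvSlotI (n : Int) v)) []
      = PySem.Set.ofList ws := by
    rw [PySem.Set.ofList_eq_foldl, hws, List.foldl_map]
  rw [hfoldws] at hinvA
  set U : List Int := PySem.Set.ofList ws with hU
  obtain ⟨halen, -, hapt⟩ := hinvA
  -- B's side: the reverse position pass…
  have hrep : (PySem.List.pyRepeat [(none : Option Int)] (m + 1)).length = n := by
    rw [PySem.List.pyRepeat_singleton]
    simp [hn]
  obtain ⟨hblen, hbpt⟩ := pv_revfill vs n hbnd vs.length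
    (PySem.List.pyRepeat [(none : Option Int)] (m + 1)) (le_refl _) hrep
  rw [List.take_length] at hbpt
  rw [← hws] at hbpt
  set vm : List (Option Int) :=
    (PySem.List.pyRange ((vs.length : Int) - 1) (-1) (-1)).foldl
      (fun mp pos => PySem.List.pySetD mp (PySem.List.pyGetD vs pos 0) (some pos))
      (PySem.List.pyRepeat [(none : Option Int)] (m + 1)) with hvm
  have hvm_none : ∀ i : Nat, i < n → (PySem.List.pyRepeat [(none : Option Int)] (m + 1))[i]?
      = some none := by
    intro i hi
    rw [PySem.List.pyRepeat_singleton, List.getElem?_replicate]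
    simp only [if_pos (by omega : i < (m + 1).toNat)]
  have hvmpt : ∀ i : Nat, i < n →
      vm[i]? = some ((PySem.List.index? ws (i : Int)).map (fun t => Int.ofNat t)) := by
    intro i hi
    rw [hvm, hbpt i hi, hvm_none i hi]
    cases hc : PySem.List.index? ws (i : Int) with
    | none => rfl
    | some t => rfl
  -- …its sorted position list is the first positions in first-appearance order…
  set g : Int → Int := fun i => ((pvFp ws i : Nat) : Int) with hg
  have hmemU : ∀ i : Int, i ∈ U ↔ i ∈ ws := fun i => PySem.Set.mem_ofList ws i
  have hfpU : ∀ i ∈ U, PySem.List.index? ws i = some (pvFp ws i) := by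
    intro i hi
    obtain ⟨t, ht⟩ := Option.isSome_iff_exists.mp
      ((PySem.List.index?_isSome_iff _ _).mpr ((hmemU i).mp hi))
    unfold pvFp
    rw [ht]
    rfl
  have hWpair : (U.map g).Pairwise (fun a b => a < b) := by
    refine List.Pairwise.map g ?_ (pv_ofList_fp_pairwise ws)
    intro a b hab
    simp [hg]
    omega
  have hWnodup : (U.map g).Nodup := hWpair.nodup
  have hPdef : vm.filterMap (fun p => p)
      = (List.range n).filterMap (fun (j : Nat) => (PySem.List.index? ws (j : Int)).map (fun t => Int.ofNat t)) := by
    have hvmeq : vm = (List.range n).map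
        (fun (j : Nat) => (PySem.List.index? ws (j : Int)).map (fun t => Int.ofNat t)) := by
      apply List.ext_getElem?
      intro i
      by_cases hi : i < n
      · rw [hvmpt i hi, List.getElem?_map, List.getElem?_range hi]
        rfl
      · rw [List.getElem?_eq_none (by rw [hblen]; omega),
            List.getElem?_eq_none (by rw [List.length_map, List.length_range]; omega)]
    rw [hvmeq, List.filterMap_map]
    rfl
  have hPnodup : (vm.filterMap (fun p => p)).Nodup := by
    rw [hPdef]
    refine List.Nodup.filterMap ?_ (List.nodup_range)
    intro a a' b hb hb'
    simp only [Option.mem_def, Option.map_eq_some_iff] at hb hb'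
    obtain ⟨t, ht, rfl⟩ := hb
    obtain ⟨t', ht', htt⟩ := hb'
    have : t = t' := (Int.ofNat.inj htt).symm
    subst this
    obtain ⟨hk, he, -⟩ := PySem.List.getElem_of_index?_eq_some ht
    obtain ⟨hk', he', -⟩ := PySem.List.getElem_of_index?_eq_some ht'
    have : ((a : Nat) : Int) = ((a' : Nat) : Int) := by rw [← he, ← he']
    omega
  have hPmem : ∀ x : Int, x ∈ vm.filterMap (fun p => p) ↔ x ∈ U.map g := by
    intro x
    rw [hPdef]
    constructor
    · intro hx
      rw [List.mem_filterMap] at hx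
      obtain ⟨i, hi, hxi⟩ := hx
      simp only [Option.map_eq_some_iff] at hxi
      obtain ⟨t, ht, rfl⟩ := hxi
      have hmem : (i : Int) ∈ ws := (PySem.List.index?_isSome_iff _ _).mp (by rw [ht]; rfl)
      rw [List.mem_map]
      refine ⟨(i : Int), (hmemU _).mpr hmem, ?_⟩
      show ((pvFp ws (i : Int) : Nat) : Int) = (t : Int)
      unfold pvFp
      rw [ht]
      rfl
    · intro hx
      rw [List.mem_map] at hx
      obtain ⟨i, hi, rfl⟩ := hx
      have hiws : i ∈ ws := (hmemU i).mp hi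
      obtain ⟨h0i, hilt⟩ := hwsb i hiws
      rw [List.mem_filterMap]
      refine ⟨i.toNat, by rw [List.mem_range]; omega, ?_⟩
      simp only [Int.ofNat_eq_natCast]
      have : ((i.toNat : Nat) : Int) = i := by omega
      rw [this, hfpU i hi]
      rfl
  have hsorted : PySem.List.sorted (vm.filterMap (fun p => p)) (fun x => x) = U.map g := by
    apply PySem.List.sorted_eq_of_perm_of_pairwise_lt
    · exact (List.perm_ext_iff_of_nodup hWnodup hPnodup).mpr (fun a => (hPmem a).symm)
    · exact hWpair
  -- …and ranking a first position in it recovers the first-appearance rank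
  have hUnodup : U.Nodup := PySem.Set.nodup_ofList ws
  have hginj : ∀ a ∈ U, ∀ b ∈ U, g a = g b → a = b := by
    intro a ha b hb hab
    refine pv_fp_inj ((hmemU a).mp ha) ((hmemU b).mp hb) ?_
    simp [hg] at hab
    omega
  -- assemble: both results are pointwise the rank in U
  apply List.ext_getElem
  · rw [halen]
    simp [hblen]
  · intro i h1 h2
    have hi : i < n := by rwa [halen] at h1
    have ha := hapt i hi
    rw [List.getElem?_eq_getElem h1] at ha
    have hb2 := hvmpt i hi
    simp only [List.getElem_map]
    rw [List.getElem?_eq_getElem (by rwa [hblen] : i < vm.length)] at hb2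
    rw [Option.some.inj ha, Option.some.inj hb2, hsorted]
    unfold pvIdx
    cases hc : PySem.List.index? ws (i : Int) with
    | none =>
      have : PySem.List.index? U (i : Int) = none := by
        apply (PySem.List.index?_eq_none_iff _ _).mpr
        rw [hmemU]
        exact (PySem.List.index?_eq_none_iff _ _).mp hc
      rw [this]
      rfl
    | some t =>
      have hiws : (i : Int) ∈ ws := (PySem.List.index?_isSome_iff _ _).mp (by rw [hc]; rfl)
      have hiU : (i : Int) ∈ U := (hmemU _).mpr hiws
      have hfpt : pvFp ws (i : Int) = t := by
        have h := hfpU _ hiU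
        rw [hc] at h
        exact (Option.some.inj h).symm
      have hgt : g (i : Int) = Int.ofNat t := by
        show ((pvFp ws (i : Int) : Nat) : Int) = Int.ofNat t
        rw [hfpt]
        rfl
      show Option.map (fun k => Int.ofNat k) (PySem.List.index? U (i : Int))
        = ((some (Int.ofNat t) : Option Int).bind
            (fun q => ((PySem.List.index? (U.map g) q : Option Nat) : Option Int).map (fun t => t)))
      rw [Option.bind_some, ← hgt, pv_index_map hiU hginj]
      cases PySem.List.index? U (i : Int) <;> rfl
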